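-- pv_equiv track=rewrite | github.com/Maithili/TAACO | utils/eval_helpers.py | _cm_dict_to_delay_or_disturbance
-- ===== SOURCE A (Python) =====
-- def _cm_dict_to_delay_or_disturbance(cm_dict):
--     sum = 0
--     for gt in cm_dict:
--         if gt in ['do_now','do_later']:
--             for pred in cm_dict[gt]:
--                 if pred in ['do_now','do_later']:
--                     if gt != pred:
--                         sum += cm_dict[gt][pred]
--     return sum
-- ===== SOURCE B (Python) =====
-- def _cm_dict_to_delay_or_disturbance(cm_dict):
--     return (cm_dict.get('do_now', {}).get('do_later', 0)
--             + cm_dict.get('do_later', {}).get('do_now', 0))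
-- ===== Notes on version B (the rewrite author's own statement) =====
-- stated objective: simpler
-- what changed: Replaces A's nested scan over all outer and inner keys (membership and inequality tests on every key) with a branch-free closed-form expression that reads the two fixed cross-cells directly via .get with defaults.
import Mathlib
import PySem

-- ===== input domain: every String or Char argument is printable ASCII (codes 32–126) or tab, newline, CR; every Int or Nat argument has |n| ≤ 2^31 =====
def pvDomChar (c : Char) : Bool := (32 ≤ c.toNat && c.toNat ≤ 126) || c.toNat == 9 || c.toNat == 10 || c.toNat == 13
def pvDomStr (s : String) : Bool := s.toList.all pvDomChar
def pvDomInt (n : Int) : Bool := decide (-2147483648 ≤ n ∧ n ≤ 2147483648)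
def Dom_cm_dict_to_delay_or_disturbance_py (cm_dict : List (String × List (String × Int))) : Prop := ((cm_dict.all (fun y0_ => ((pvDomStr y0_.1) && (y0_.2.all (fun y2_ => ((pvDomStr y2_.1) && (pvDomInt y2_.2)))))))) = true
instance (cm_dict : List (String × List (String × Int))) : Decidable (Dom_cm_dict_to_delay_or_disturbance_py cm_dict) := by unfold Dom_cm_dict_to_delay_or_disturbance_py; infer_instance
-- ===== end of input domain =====

-- B replaces A's nested scan over all keys with a direct read of the two fixed cross-cells ('do_now'→'do_later' and 'do_later'→'do_now') via .get defaults; objective: simpler.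

-- ===== PORT A =====
-- Literal transliteration: iterate the dict's keys in insertion order; cm_dict[gt] / cm_dict[gt][pred]
-- are dict lookups (PySem.Dict.get?; the key being iterated is present, so .getD only discharges the Option).
def cm_dict_to_delay_or_disturbance_py (cm_dict : List (String × List (String × Int))) : Int :=
  cm_dict.foldl (fun s p =>
    if p.1 = "do_now" ∨ p.1 = "do_later" then
      (((PySem.Dict.mk cm_dict).get? p.1).getD []).foldl (fun s2 q =>
        if (q.1 = "do_now" ∨ q.1 = "do_later") ∧ p.1 ≠ q.1 then
          s2 + ((PySem.Dict.mk (((PySem.Dict.mk cm_dict).get? p.1).getD [])).get? q.1).getD 0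
        else s2) s
    else s) 0

-- ===== PORT B =====
-- cm_dict.get('do_now', {}).get('do_later', 0) + cm_dict.get('do_later', {}).get('do_now', 0)
def cm_dict_to_delay_or_disturbance_py_alt (cm_dict : List (String × List (String × Int))) : Int :=
  (PySem.Dict.mk ((PySem.Dict.mk cm_dict).getD "do_now" [])).getD "do_later" 0
  + (PySem.Dict.mk ((PySem.Dict.mk cm_dict).getD "do_later" [])).getD "do_now" 0

-- ===== PRECONDITION & SPEC =====
-- Pre_ excludes association lists with a duplicated outer key or a duplicated key inside an inner list:
-- such lists do not represent any Python dict (a dict's keys are unique), so A is never called on them.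
def Pre_cm_dict_to_delay_or_disturbance_py (cm_dict : List (String × List (String × Int))) : Prop :=
  (cm_dict.map Prod.fst).Nodup ∧ ∀ p ∈ cm_dict, (p.2.map Prod.fst).Nodup
instance (cm_dict : List (String × List (String × Int))) : Decidable (Pre_cm_dict_to_delay_or_disturbance_py cm_dict) := by unfold Pre_cm_dict_to_delay_or_disturbance_py; infer_instance

def pvWitness_cm_dict_to_delay_or_disturbance_py : (List (String × List (String × Int))) :=
  [("do_now", [("do_later", 3), ("do_now", 5)]), ("do_later", [("do_now", 7)])]

def Spec_cm_dict_to_delay_or_disturbance_py (cm_dict : List (String × List (String × Int))) (out : Int) : Prop := out = cm_dict_to_delay_or_disturbance_py_alt cm_dict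
instance (cm_dict : List (String × List (String × Int))) (out : Int) : Decidable (Spec_cm_dict_to_delay_or_disturbance_py cm_dict out) := by unfold Spec_cm_dict_to_delay_or_disturbance_py; infer_instance

-- ===== CLAIM (what is proved, stated in full; the proofs are below) =====
def Claim_equal_cm_dict_to_delay_or_disturbance_py : Prop := ∀ (cm_dict : List (String × List (String × Int))), Dom_cm_dict_to_delay_or_disturbance_py cm_dict → Pre_cm_dict_to_delay_or_disturbance_py cm_dict → Spec_cm_dict_to_delay_or_disturbance_py cm_dict (cm_dict_to_delay_or_disturbance_py cm_dict)

-- ===== LEMMAS AND PROOFS =====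

-- A fold over an assoc list with unique keys that adds the looked-up value exactly at key k
-- totals the dict's value at k (0 when absent).
lemma pv_fold_one_key_raw (v : List (String × Int)) (hn : (v.map Prod.fst).Nodup) (k : String) (s : Int) :
    v.foldl (fun s2 q => if q.1 = k then s2 + q.2 else s2) s
      = s + (PySem.Dict.mk v).getD k 0 := by
  induction v generalizing s with
  | nil => simp [PySem.Dict.getD, PySem.Dict.get?]
  | cons a t ih =>
    simp only [List.map_cons, List.nodup_cons] at hn
    obtain ⟨ha, ht⟩ := hn
    simp only [List.foldl_cons]
    rw [PySem.Dict.getD_eq_get?_getD, PySem.Dict.get?_mk_cons]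
    by_cases h : a.1 = k
    · have hnot : (PySem.Dict.mk t).get? k = none := by
        rw [PySem.Dict.get?_eq_none_iff_not_mem_keys]
        intro hm
        exact ha (h ▸ hm)
      rw [if_pos h, ih ht, PySem.Dict.getD_eq_get?_getD, hnot]
      simp [h]
    · rw [if_neg h, ih ht, PySem.Dict.getD_eq_get?_getD]
      simp [show (a.1 == k) = false by simpa using h]

lemma pv_fold_one_key (v : List (String × Int)) (hn : (v.map Prod.fst).Nodup) (k : String) (s : Int) :
    v.foldl (fun s2 q => if q.1 = k then s2 + ((PySem.Dict.mk v).get? q.1).getD 0 else s2) s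
      = s + (PySem.Dict.mk v).getD k 0 := by
  rw [PySem.List.foldl_congr_mem v _ (fun s2 q => if q.1 = k then s2 + q.2 else s2) s ?_]
  · exact pv_fold_one_key_raw v hn k s
  · intro acc q hq
    by_cases h : q.1 = k
    · have : (PySem.Dict.mk v).get? q.1 = some q.2 :=
        PySem.Dict.get?_of_mem_items (PySem.Dict.mk v) (by simpa using hq) hn
      rw [h] at this
      simp [h, this]
    · simp [h]

-- A fold over an assoc list with unique keys that contributes f at "do_now" and g at "do_later"
-- totals f and g at the two looked-up values (with f [] = 0, g [] = 0 covering absence).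
lemma pv_fold_two_keys (l : List (String × List (String × Int)))
    (hn : (l.map Prod.fst).Nodup) (f g : List (String × Int) → Int)
    (hf : f [] = 0) (hg : g [] = 0) (s : Int) :
    l.foldl (fun s p => if p.1 = "do_now" then s + f p.2 else if p.1 = "do_later" then s + g p.2 else s) s
      = s + f ((PySem.Dict.mk l).getD "do_now" []) + g ((PySem.Dict.mk l).getD "do_later" []) := by
  induction l generalizing s with
  | nil => simp [PySem.Dict.getD, PySem.Dict.get?, hf, hg]
  | cons a t ih =>
    simp only [List.map_cons, List.nodup_cons] at hn
    obtain ⟨ha, ht⟩ := hn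
    simp only [List.foldl_cons]
    rw [show (PySem.Dict.mk (a :: t)).getD "do_now" []
          = if a.1 = "do_now" then a.2 else (PySem.Dict.mk t).getD "do_now" [] by
        rw [PySem.Dict.getD_eq_get?_getD, PySem.Dict.get?_mk_cons, PySem.Dict.getD_eq_get?_getD]
        by_cases h : a.1 = "do_now" <;> simp [h]]
    rw [show (PySem.Dict.mk (a :: t)).getD "do_later" []
          = if a.1 = "do_later" then a.2 else (PySem.Dict.mk t).getD "do_later" [] by
        rw [PySem.Dict.getD_eq_get?_getD, PySem.Dict.get?_mk_cons, PySem.Dict.getD_eq_get?_getD]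
        by_cases h : a.1 = "do_later" <;> simp [h]]
    have habsent : ∀ k : String, a.1 = k → (PySem.Dict.mk t).getD k [] = [] := by
      intro k hk
      rw [PySem.Dict.getD_eq_get?_getD,
        (PySem.Dict.get?_eq_none_iff_not_mem_keys _ _).2 (fun hm => ha (hk ▸ hm))]
      rfl
    by_cases h1 : a.1 = "do_now"
    · rw [if_pos h1, ih ht, if_pos h1, if_neg (by rw [h1]; decide), habsent "do_now" h1, hf]
      ring
    · rw [if_neg h1, if_neg h1]
      by_cases h2 : a.1 = "do_later"
      · rw [if_pos h2, ih ht, if_pos h2, habsent "do_later" h2, hg]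
        ring
      · rw [if_neg h2, if_neg h2, ih ht]

-- ===== VERDICT (by name: the statement is the Claim_ definition above) =====
theorem cm_dict_to_delay_or_disturbance_py_spec : Claim_equal_cm_dict_to_delay_or_disturbance_py := by
  intro cm_dict _ hpre
  obtain ⟨hn, hin⟩ := hpre
  unfold Spec_cm_dict_to_delay_or_disturbance_py cm_dict_to_delay_or_disturbance_py
    cm_dict_to_delay_or_disturbance_py_alt
  rw [PySem.List.foldl_congr_mem cm_dict _
      (fun s p => if p.1 = "do_now" then s + (PySem.Dict.mk p.2).getD "do_later" 0
        else if p.1 = "do_later" then s + (PySem.Dict.mk p.2).getD "do_now" 0 else s) 0 ?_]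
  · rw [pv_fold_two_keys cm_dict hn
        (fun v => (PySem.Dict.mk v).getD "do_later" 0)
        (fun v => (PySem.Dict.mk v).getD "do_now" 0) (by decide) (by decide) 0]
    ring
  · intro acc p hp
    beta_reduce
    by_cases h1 : p.1 = "do_now"
    · have hget : (PySem.Dict.mk cm_dict).get? p.1 = some p.2 :=
        PySem.Dict.get?_of_mem_items (PySem.Dict.mk cm_dict) (by simpa using hp) hn
      rw [if_pos (Or.inl h1), if_pos h1, hget]
      have hbody : (fun (s2 : Int) (q : String × Int) =>
          if (q.1 = "do_now" ∨ q.1 = "do_later") ∧ p.1 ≠ q.1 then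
            s2 + ((PySem.Dict.mk ((some p.2).getD [])).get? q.1).getD 0 else s2)
          = (fun s2 q => if q.1 = "do_later" then
            s2 + ((PySem.Dict.mk p.2).get? q.1).getD 0 else s2) := by
        funext s2 q
        by_cases hq : q.1 = "do_later"
        · simp [hq, h1]
        · by_cases hq2 : q.1 = "do_now" <;> simp [hq, hq2, h1]
      simp only [hbody]
      exact pv_fold_one_key p.2 (hin p hp) "do_later" acc
    · by_cases h2 : p.1 = "do_later"
      · have hget : (PySem.Dict.mk cm_dict).get? p.1 = some p.2 :=
          PySem.Dict.get?_of_mem_items (PySem.Dict.mk cm_dict) (by simpa using hp) hn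
        rw [if_pos (Or.inr h2), if_neg h1, if_pos h2, hget]
        have hbody : (fun (s2 : Int) (q : String × Int) =>
            if (q.1 = "do_now" ∨ q.1 = "do_later") ∧ p.1 ≠ q.1 then
              s2 + ((PySem.Dict.mk ((some p.2).getD [])).get? q.1).getD 0 else s2)
            = (fun s2 q => if q.1 = "do_now" then
              s2 + ((PySem.Dict.mk p.2).get? q.1).getD 0 else s2) := by
          funext s2 q
          by_cases hq : q.1 = "do_now"
          · simp [hq, h2]
          · by_cases hq2 : q.1 = "do_later" <;> simp [hq, hq2, h2]
        simp only [hbody]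
        exact pv_fold_one_key p.2 (hin p hp) "do_now" acc
      · rw [if_neg (by tauto), if_neg h1, if_neg h2]
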